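-- pv_equiv track=rewrite | github.com/mrmotta/polimi-rl | test_benches/old_generator.py | process
-- ===== SOURCE A (Python) =====
-- def process(input_list):
-- 	result = []
-- 	state = 0
-- 	input = []
-- 	for index in range(0, len(input_list)):
-- 		input += input_list[index]
-- 	for index in range(0, len(input)):
-- 		if state == 0:
-- 			if input[index] == 0:
-- 				state = 0
-- 				result.append(0)
-- 				result.append(0)
-- 			else:
-- 				state = 2
-- 				result.append(1)
-- 				result.append(1)
-- 		elif state == 1:
-- 			if input[index] == 0:
-- 				state = 0
-- 				result.append(1)
-- 				result.append(1)
-- 			else: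
-- 				state = 2
-- 				result.append(0)
-- 				result.append(0)
-- 		elif state == 2:
-- 			if input[index] == 0:
-- 				state = 1
-- 				result.append(0)
-- 				result.append(1)
-- 			else:
-- 				state = 3
-- 				result.append(1)
-- 				result.append(0)
-- 		else:
-- 			if input[index] == 0:
-- 				state = 1
-- 				result.append(1)
-- 				result.append(0)
-- 			else:
-- 				state = 3
-- 				result.append(0)
-- 				result.append(1)
-- 	return [result[index : index + 8] for index in range(0, len(result), 8)]
-- ===== SOURCE B (Python) =====
-- def process(input_list):
--     flat = [x for row in input_list for x in row]
--     result = []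
--     b = 0
--     c = 0
--     for v in flat:
--         cur = 1 if v != 0 else 0
--         result.append(cur ^ c)
--         result.append(cur ^ b ^ c)
--         c = b
--         b = cur
--     return [result[i : i + 8] for i in range(0, len(result), 8)]
-- ===== Notes on version B (the rewrite author's own statement) =====
-- stated objective: simpler
-- what changed: Replaces the 4-state FSM with explicit branch tables by a sliding two-bit window (previous and before-previous input bit), computing both output bits directly as XORs of the current, previous and before-previous bits.
import Mathlib
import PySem

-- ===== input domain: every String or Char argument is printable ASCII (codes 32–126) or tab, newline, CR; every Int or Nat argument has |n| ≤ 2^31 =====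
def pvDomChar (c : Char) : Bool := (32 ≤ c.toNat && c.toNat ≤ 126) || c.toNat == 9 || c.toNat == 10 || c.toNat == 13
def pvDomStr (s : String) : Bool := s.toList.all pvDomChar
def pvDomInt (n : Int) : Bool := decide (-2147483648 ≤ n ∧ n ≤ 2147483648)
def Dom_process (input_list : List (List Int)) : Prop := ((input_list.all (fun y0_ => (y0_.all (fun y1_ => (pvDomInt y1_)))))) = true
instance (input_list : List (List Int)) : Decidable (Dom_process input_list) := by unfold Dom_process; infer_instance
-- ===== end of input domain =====

-- B replaces A's 4-state FSM branch tables by a sliding two-bit window (previous and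
-- before-previous input bit), computing both output bits as XORs; objective: simpler.


-- ===== PORT A =====
-- A's FSM step: state in {0,1,2,3}, branch table exactly as in the Python
def processStepA (st : Int × List Int) (v : Int) : Int × List Int :=
  if st.1 = 0 then
    if v = 0 then (0, st.2 ++ [0, 0]) else (2, st.2 ++ [1, 1])
  else if st.1 = 1 then
    if v = 0 then (0, st.2 ++ [1, 1]) else (2, st.2 ++ [0, 0])
  else if st.1 = 2 then
    if v = 0 then (1, st.2 ++ [0, 1]) else (3, st.2 ++ [1, 0])
  else
    if v = 0 then (1, st.2 ++ [1, 0]) else (3, st.2 ++ [0, 1])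

def process (input_list : List (List Int)) : List (List Int) :=
  -- input += input_list[index] over range(0, len(input_list))
  let input := (PySem.List.pyRange 0 (input_list.length : Int) 1).foldl
    (fun acc j => acc ++ (PySem.List.pyGetD input_list j [])) []
  -- FSM loop over range(0, len(input))
  let fin := (PySem.List.pyRange 0 (input.length : Int) 1).foldl
    (fun st j => processStepA st (PySem.List.pyGetD input j 0)) ((0 : Int), ([] : List Int))
  let result := fin.2
  (PySem.List.pyRange 0 (result.length : Int) 8).map
    (fun i => PySem.List.slice result (some i) (some (i + 8)))

-- ===== PORT B =====
-- B's step: (b, c) = (previous bit, before-previous bit); outputs are XORs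
def processStepB (st : Int × Int × List Int) (v : Int) : Int × Int × List Int :=
  let cur : Int := if v ≠ 0 then 1 else 0
  (cur, st.1, st.2.2 ++ [PySem.Int.bxor cur st.2.1, PySem.Int.bxor (PySem.Int.bxor cur st.1) st.2.1])

def process_alt (input_list : List (List Int)) : List (List Int) :=
  let flat := input_list.flatMap (fun row => row)
  let fin := flat.foldl processStepB ((0 : Int), (0 : Int), ([] : List Int))
  let result := fin.2.2
  (PySem.List.pyRange 0 (result.length : Int) 8).map
    (fun i => PySem.List.slice result (some i) (some (i + 8)))

-- ===== PRECONDITION & SPEC =====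
def Spec_process (input_list : List (List Int)) (out : List (List Int)) : Prop := out = process_alt input_list
instance (input_list : List (List Int)) (out : List (List Int)) : Decidable (Spec_process input_list out) := by unfold Spec_process; infer_instance

-- ===== CLAIM (what is proved, stated in full; the proofs are below) =====
def Claim_equal_process : Prop := ∀ (input_list : List (List Int)), Dom_process input_list → Spec_process input_list (process input_list)

-- ===== LEMMAS AND PROOFS =====

-- A's index-driven flattening equals B's comprehension flattening
theorem process_flatten_eq (l : List (List Int)) :
    (PySem.List.pyRange 0 (l.length : Int) 1).foldl
      (fun acc j => acc ++ (PySem.List.pyGetD l j [])) [] = l.flatMap (fun row => row) := by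
  rw [PySem.List.foldl_pyRange_zero_pyGetD' l [] (fun acc row => acc ++ row) []]
  rw [PySem.List.foldl_append_eq_flatMap (fun row => row) l []]
  simp

-- the two FSM loops produce the same result list, under the state correspondence
-- stateA = 2*b + c with b, c in {0, 1}
theorem process_fsm_eq (flat : List Int) :
    ∀ (b c : Int) (res : List Int), (b = 0 ∨ b = 1) → (c = 0 ∨ c = 1) →
    (flat.foldl processStepA (2 * b + c, res)).2
      = (flat.foldl processStepB (b, c, res)).2.2 := by
  induction flat with
  | nil => intro b c res hb hc; rfl
  | cons v vs ih =>
    intro b c res hb hc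
    have e00 : PySem.Int.bxor 0 0 = 0 := by decide
    have e01 : PySem.Int.bxor 0 1 = 1 := by decide
    have e10 : PySem.Int.bxor 1 0 = 1 := by decide
    have e11 : PySem.Int.bxor 1 1 = 0 := by decide
    by_cases hv : v = 0 <;>
      rcases hb with hb | hb <;> rcases hc with hc | hc <;>
      subst hb hc <;>
      simp only [List.foldl_cons, processStepA, processStepB] <;>
      norm_num [hv, e00, e01, e10, e11] <;>
      first
        | simpa using ih 0 0 _ (Or.inl rfl) (Or.inl rfl)
        | simpa using ih 0 1 _ (Or.inl rfl) (Or.inr rfl)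
        | simpa using ih 1 0 _ (Or.inr rfl) (Or.inl rfl)
        | simpa using ih 1 1 _ (Or.inr rfl) (Or.inr rfl)

-- ===== VERDICT (by name: the statement is the Claim_ definition above) =====
theorem process_spec : Claim_equal_process := by
  intro input_list _
  unfold Spec_process process process_alt
  simp only [process_flatten_eq,
    PySem.List.foldl_pyRange_zero_pyGetD' (input_list.flatMap (fun row => row)) 0 processStepA
      ((0 : Int), ([] : List Int))]
  have hres : ((input_list.flatMap (fun row => row)).foldl processStepA
        ((0 : Int), ([] : List Int))).2
      = ((input_list.flatMap (fun row => row)).foldl processStepB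
        ((0 : Int), (0 : Int), ([] : List Int))).2.2 := by
    simpa using process_fsm_eq (input_list.flatMap (fun row => row)) 0 0 []
      (Or.inl rfl) (Or.inl rfl)
  rw [hres]
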